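-- pv_equiv track=rewrite | github.com/Hasan-Mustafa8901/mis | frontend/components/table.py | build_ordered_columns
-- ===== SOURCE A (Python) =====
-- def build_ordered_columns(row: dict, stage: str = "combined"):
--     """
--     Build ordered columns for the MIS table.
--     """
--     keys = list(row.keys())
--
--     def pick(prefix):
--         return [k for k in keys if k.startswith(prefix)]
--
--     ordered = []
--
--     # 1. Core info
--     ordered += [
--         "id",
--         "customer_name",
--         "mobile_number",
--         "variant_name",
--         "booking_date",
--     ]
--     if stage == "delivery":
--         ordered.append("delivery_date")
--
--     # 2. Price components
--     ordered += pick("Ex ") + pick("Insurance") + pick("Registration")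
--
--     # 3. Discount components
--     ordered += [k for k in keys if "_actual" in k and "Discount" in k]
--
--     # 5. Conditions
--     ordered += pick("cond_")
--
--     # 6. Accessories / finance / exchange
--     ordered += pick("accessories_")
--     ordered += pick("finance_")
--     ordered += pick("exchange_")
--
--     # 7. Checklist
--     ordered += pick("checklist_")
--
--     # 8. Audit
--     ordered += pick("audit_")
--
--     # 9. Totals
--     ordered += [
--         "net_receivable",
--         "total_received",
--         "balance_amount",
--         "total_actual_discount",
--         "total_allowed_discount",
--         "total_excess_discount",
--         "status",
--     ]
--
--     # remove duplicates + preserve order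
--     seen = set()
--     ordered = [x for x in ordered if not (x in seen or seen.add(x))]
--
--     return ordered
-- ===== SOURCE B (Python) =====
-- def build_ordered_columns(row: dict, stage: str = "combined"):
--     """Single-pass bucketing: each key is assigned once to its first matching
--     group in a table of predicates, instead of rescanning the key list per group."""
--     preds = [
--         lambda k: k.startswith("Ex "),
--         lambda k: k.startswith("Insurance"),
--         lambda k: k.startswith("Registration"),
--         lambda k: "_actual" in k and "Discount" in k,
--         lambda k: k.startswith("cond_"),
--         lambda k: k.startswith("accessories_"),
--         lambda k: k.startswith("finance_"),
--         lambda k: k.startswith("exchange_"),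
--         lambda k: k.startswith("checklist_"),
--         lambda k: k.startswith("audit_"),
--     ]
--     buckets = [[] for _ in preds]
--     for k in row.keys():
--         for i, p in enumerate(preds):
--             if p(k):
--                 buckets[i].append(k)
--                 break
--     core = ["id", "customer_name", "mobile_number", "variant_name", "booking_date"]
--     if stage == "delivery":
--         core.append("delivery_date")
--     totals = ["net_receivable", "total_received", "balance_amount",
--               "total_actual_discount", "total_allowed_discount",
--               "total_excess_discount", "status"]
--     out, seen = [], set()
--     for x in core + [k for b in buckets for k in b] + totals:
--         if x not in seen:
--             seen.add(x)
--             out.append(x)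
--     return out
-- ===== Notes on version B (the rewrite author's own statement) =====
-- stated objective: alternative
-- what changed: Replaces A's ten separate pick()/comprehension rescans of the key list (group-major) with a single key-major pass that assigns each key to the first matching bucket in an ordered predicate table, then concatenates core literals, buckets and totals before the same first-wins dedup.
import Mathlib
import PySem

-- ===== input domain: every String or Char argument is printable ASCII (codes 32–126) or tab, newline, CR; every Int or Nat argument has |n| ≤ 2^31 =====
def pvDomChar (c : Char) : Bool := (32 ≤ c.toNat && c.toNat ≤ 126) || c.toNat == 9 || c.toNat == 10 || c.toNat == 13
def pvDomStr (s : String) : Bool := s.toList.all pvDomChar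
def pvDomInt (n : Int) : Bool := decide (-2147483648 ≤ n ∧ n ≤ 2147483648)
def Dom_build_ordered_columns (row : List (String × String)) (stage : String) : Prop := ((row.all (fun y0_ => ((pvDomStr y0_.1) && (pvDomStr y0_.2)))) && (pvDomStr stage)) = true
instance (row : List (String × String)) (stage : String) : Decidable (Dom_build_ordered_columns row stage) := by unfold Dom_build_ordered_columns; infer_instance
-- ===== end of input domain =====

-- B replaces A's ten group-major rescans of the key list by one key-major pass that drops
-- each key into the first matching bucket of an ordered predicate table (objective: alternative).

-- shared helper: the first-wins dedup loop both Pythons end with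
-- ('[x for x in ordered if not (x in seen or seen.add(x))]' with a set 'seen');
-- returns (kept elements, final seen set)
def ddAux (seen : PySem.Set String) : List String → List String × PySem.Set String
  | [] => ([], seen)
  | x :: xs =>
    if PySem.Set.contains seen x then ddAux seen xs
    else
      let r := ddAux (PySem.Set.add seen x) xs
      (x :: r.1, r.2)

-- ===== PORT A =====
def build_ordered_columns (row : List (String × String)) (stage : String) : List String :=
  let keys := PySem.Set.ofList (row.map Prod.fst)   -- list(row.keys())
  let pick := fun (pre : String) => keys.filter (fun k => PySem.Str.startswith k pre)
  let ordered := ["id", "customer_name", "mobile_number", "variant_name", "booking_date"]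
  let ordered := if stage == "delivery" then ordered ++ ["delivery_date"] else ordered
  let ordered := ordered ++ (pick "Ex " ++ pick "Insurance" ++ pick "Registration")
  let ordered := ordered ++ keys.filter (fun k => PySem.Str.isIn "_actual" k && PySem.Str.isIn "Discount" k)
  let ordered := ordered ++ pick "cond_"
  let ordered := ordered ++ pick "accessories_"
  let ordered := ordered ++ pick "finance_"
  let ordered := ordered ++ pick "exchange_"
  let ordered := ordered ++ pick "checklist_"
  let ordered := ordered ++ pick "audit_"
  let ordered := ordered ++ ["net_receivable", "total_received", "balance_amount",
      "total_actual_discount", "total_allowed_discount", "total_excess_discount", "status"]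
  (ddAux PySem.Set.empty ordered).1

-- ===== PORT B =====
-- the ordered table of bucket predicates
def bPreds : List (String → Bool) :=
  [ fun k => PySem.Str.startswith k "Ex ",
    fun k => PySem.Str.startswith k "Insurance",
    fun k => PySem.Str.startswith k "Registration",
    fun k => PySem.Str.isIn "_actual" k && PySem.Str.isIn "Discount" k,
    fun k => PySem.Str.startswith k "cond_",
    fun k => PySem.Str.startswith k "accessories_",
    fun k => PySem.Str.startswith k "finance_",
    fun k => PySem.Str.startswith k "exchange_",
    fun k => PySem.Str.startswith k "checklist_",
    fun k => PySem.Str.startswith k "audit_" ]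

-- one step of the single pass: append k to the bucket of its first matching predicate
-- ('for i, p in enumerate(preds): if p(k): buckets[i].append(k); break')
def bStep (bs : List (List String)) (k : String) : List (List String) :=
  match bPreds.findIdx? (fun p => p k) with
  | some i => bs.modify i (· ++ [k])
  | none => bs

def build_ordered_columns_alt (row : List (String × String)) (stage : String) : List String :=
  let keys := PySem.Set.ofList (row.map Prod.fst)   -- row.keys()
  let buckets := keys.foldl bStep (List.replicate bPreds.length [])
  let core := ["id", "customer_name", "mobile_number", "variant_name", "booking_date"]
  let core := if stage == "delivery" then core ++ ["delivery_date"] else core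
  let totals := ["net_receivable", "total_received", "balance_amount",
      "total_actual_discount", "total_allowed_discount", "total_excess_discount", "status"]
  (ddAux PySem.Set.empty (core ++ buckets.flatten ++ totals)).1

-- ===== PRECONDITION & SPEC =====
def Spec_build_ordered_columns (row : List (String × String)) (stage : String) (out : List String) : Prop := out = build_ordered_columns_alt row stage
instance (row : List (String × String)) (stage : String) (out : List String) : Decidable (Spec_build_ordered_columns row stage out) := by unfold Spec_build_ordered_columns; infer_instance

-- ===== CLAIM (what is proved, stated in full; the proofs are below) =====
def Claim_equal_build_ordered_columns : Prop := ∀ (row : List (String × String)) (stage : String), Dom_build_ordered_columns row stage → Spec_build_ordered_columns row stage (build_ordered_columns row stage)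

-- ===== LEMMAS AND PROOFS =====

-- A's grouping: for each predicate in turn, the matching keys (group-major)
def Gm (ps : List (String → Bool)) (keys : List String) : List String :=
  ps.flatMap (fun p => keys.filter p)

-- B's grouping, in "peeling" form: first bucket, then the rest on the unmatched keys
def Bm : List (String → Bool) → List String → List String
  | [], _ => []
  | p :: ps, keys => keys.filter p ++ Bm ps (keys.filter (fun k => !p k))

theorem contains_add_mono (s : PySem.Set String) (x y : String)
    (h : PySem.Set.contains s y = true) :
    PySem.Set.contains (PySem.Set.add s x) y = true := by
  simp only [PySem.Set.contains_iff] at h ⊢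
  simp [PySem.Set.mem_add, h]

theorem ddAux_seen_mem (l : List String) (seen : PySem.Set String) (x : String)
    (h : x ∈ l ∨ PySem.Set.contains seen x = true) :
    PySem.Set.contains (ddAux seen l).2 x = true := by
  induction l generalizing seen with
  | nil =>
    rcases h with h | h
    · simp at h
    · simpa [ddAux] using h
  | cons y ys ih =>
    by_cases hc : PySem.Set.contains seen y = true
    · simp only [ddAux, hc, if_true]
      rcases h with h | h
      · rcases List.mem_cons.mp h with rfl | hm
        · exact ih seen (Or.inr hc)
        · exact ih seen (Or.inl hm)
      · exact ih seen (Or.inr h)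
    · simp only [ddAux, hc, if_false, Bool.false_eq_true]
      rcases h with h | h
      · rcases List.mem_cons.mp h with rfl | hm
        · refine ih _ (Or.inr ?_)
          simp [PySem.Set.mem_add]
        · exact ih _ (Or.inl hm)
      · exact ih _ (Or.inr (contains_add_mono seen y x h))

theorem ddAux_append (l1 l2 : List String) (seen : PySem.Set String) :
    ddAux seen (l1 ++ l2) =
      ((ddAux seen l1).1 ++ (ddAux (ddAux seen l1).2 l2).1, (ddAux (ddAux seen l1).2 l2).2) := by
  induction l1 generalizing seen with
  | nil => simp [ddAux]
  | cons x xs ih =>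
    by_cases hc : PySem.Set.contains seen x = true
    · simp only [List.cons_append, ddAux, hc, if_true]
      exact ih seen
    · simp only [List.cons_append, ddAux, hc, if_false, Bool.false_eq_true]
      simp [ih (PySem.Set.add seen x)]

theorem ddAux_drop (bad : String → Bool) (l : List String) (seen : PySem.Set String)
    (h : ∀ x ∈ l, bad x = true → PySem.Set.contains seen x = true) :
    ddAux seen l = ddAux seen (l.filter (fun x => !bad x)) := by
  induction l generalizing seen with
  | nil => rfl
  | cons x xs ih =>
    by_cases hb : bad x = true
    · have hc : PySem.Set.contains seen x = true := h x List.mem_cons_self hb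
      simp only [List.filter_cons, hb, Bool.not_true, if_false, Bool.false_eq_true]
      simp only [ddAux, hc, if_true]
      exact ih seen (fun y hy hby => h y (List.mem_cons_of_mem _ hy) hby)
    · have hb' : bad x = false := by simpa using hb
      simp only [List.filter_cons, hb', Bool.not_false, if_true]
      by_cases hc : PySem.Set.contains seen x = true
      · simp only [ddAux, hc, if_true]
        exact ih seen (fun y hy hby => h y (List.mem_cons_of_mem _ hy) hby)
      · simp only [ddAux, hc, if_false, Bool.false_eq_true]
        have := ih (PySem.Set.add seen x)
          (fun y hy hby => contains_add_mono seen x y (h y (List.mem_cons_of_mem _ hy) hby))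
        simp [this]

theorem mem_Gm {x : String} {ps : List (String → Bool)} {keys : List String}
    (h : x ∈ Gm ps keys) : x ∈ keys := by
  simp only [Gm, List.mem_flatMap, List.mem_filter] at h
  obtain ⟨p, _, hk, _⟩ := h
  exact hk

theorem Gm_filter (p : String → Bool) (ps : List (String → Bool)) (keys : List String) :
    (Gm ps keys).filter (fun x => !p x) = Gm ps (keys.filter (fun x => !p x)) := by
  induction ps with
  | nil => simp [Gm]
  | cons q ps ih =>
    simp only [Gm, List.flatMap_cons, List.filter_append] at *
    rw [ih, List.filter_filter, List.filter_filter]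
    congr 1
    apply List.filter_congr
    intro a _
    exact Bool.and_comm _ _

-- the heart: under the first-wins dedup, group-major and first-bucket grouping agree
theorem dd_GB (ps : List (String → Bool)) (keys : List String) (seen : PySem.Set String) :
    ddAux seen (Gm ps keys) = ddAux seen (Bm ps keys) := by
  induction ps generalizing keys seen with
  | nil => simp [Gm, Bm]
  | cons p ps ih =>
    have hG : Gm (p :: ps) keys = keys.filter p ++ Gm ps keys := by
      simp [Gm, List.flatMap_cons]
    rw [hG, Bm, ddAux_append, ddAux_append]
    have hdrop : ddAux (ddAux seen (keys.filter p)).2 (Gm ps keys)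
        = ddAux (ddAux seen (keys.filter p)).2 ((Gm ps keys).filter (fun x => !p x)) := by
      refine ddAux_drop p _ _ (fun x hx hbx => ?_)
      exact ddAux_seen_mem _ _ _ (Or.inl (List.mem_filter.mpr ⟨mem_Gm hx, hbx⟩))
    rw [hdrop, Gm_filter, ih]

theorem foldl_bStep_getElem? (keys : List String) (bs : List (List String)) (i : Nat) :
    (keys.foldl bStep bs)[i]? =
      (bs[i]?).map (· ++ keys.filter (fun k => bPreds.findIdx? (fun p => p k) == some i)) := by
  induction keys generalizing bs with
  | nil =>
    simp
  | cons k ks ih =>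
    rw [List.foldl_cons, ih]
    unfold bStep
    cases hf : bPreds.findIdx? (fun p => p k) with
    | none =>
      simp only [List.filter_cons, hf]
      simp
    | some j =>
      rw [List.getElem?_modify]
      cases hbs : bs[i]? with
      | none => simp
      | some a =>
        by_cases hji : j = i
        · subst hji
          simp [hf, List.append_assoc]
        · simp [hf, hji]

theorem buckets_eq (keys : List String) :
    keys.foldl bStep (List.replicate bPreds.length []) =
      (List.range bPreds.length).map
        (fun i => keys.filter (fun k => bPreds.findIdx? (fun p => p k) == some i)) := by
  apply List.ext_getElem?
  intro i
  rw [foldl_bStep_getElem?]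
  by_cases hi : i < bPreds.length
  · simp [hi]
  · rw [List.getElem?_eq_none (by simpa using Nat.le_of_not_lt hi),
      List.getElem?_eq_none (by simpa using Nat.le_of_not_lt hi)]
    rfl

theorem flatten_buckets (ps : List (String → Bool)) (keys : List String) :
    ((List.range ps.length).map
        (fun i => keys.filter (fun k => ps.findIdx? (fun p => p k) == some i))).flatten =
      Bm ps keys := by
  induction ps generalizing keys with
  | nil => simp [Bm]
  | cons p ps ih =>
    rw [Bm, List.length_cons, List.range_succ_eq_map]
    simp only [List.map_cons, List.map_map, List.flatten_cons]
    congr 1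
    · apply List.filter_congr
      intro k _
      simp only [List.findIdx?_cons]
      cases hp : p k
      · simp only [Bool.false_eq_true, if_false]
        cases List.findIdx? (fun p => p k) ps <;> simp
      · simp
    · rw [← ih (keys.filter (fun k => !p k))]
      congr 1
      apply List.map_congr_left
      intro i _
      simp only [Function.comp]
      rw [List.filter_filter]
      apply List.filter_congr
      intro k _
      simp only [List.findIdx?_cons]
      cases hp : p k
      · simp only [Bool.false_eq_true, if_false, Bool.not_false, Bool.and_true]
        cases List.findIdx? (fun p => p k) ps <;> simp [Nat.succ_eq_add_one]
      · simp

theorem dd_ctx (seen : PySem.Set String) (pre post keys : List String)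
    (ps : List (String → Bool)) :
    ddAux seen (pre ++ (Gm ps keys ++ post)) = ddAux seen (pre ++ (Bm ps keys ++ post)) := by
  simp only [ddAux_append, dd_GB]

-- ===== VERDICT (by name: the statement is the Claim_ definition above) =====
theorem build_ordered_columns_spec : Claim_equal_build_ordered_columns := by
  unfold Claim_equal_build_ordered_columns
  intro row stage _
  unfold Spec_build_ordered_columns
  simp only [build_ordered_columns, build_ordered_columns_alt]
  rw [buckets_eq, flatten_buckets]
  have key : ∀ pre post keys : List String,
      (ddAux PySem.Set.empty (pre ++ (Gm bPreds keys ++ post))).1 =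
        (ddAux PySem.Set.empty (pre ++ (Bm bPreds keys ++ post))).1 :=
    fun pre post keys => congrArg Prod.fst (dd_ctx PySem.Set.empty pre post keys bPreds)
  cases hs : stage == "delivery" with
  | false =>
    simp only [Bool.false_eq_true, if_false]
    refine Eq.trans ?_ (Eq.trans
      (key ["id", "customer_name", "mobile_number", "variant_name", "booking_date"]
        ["net_receivable", "total_received", "balance_amount", "total_actual_discount",
          "total_allowed_discount", "total_excess_discount", "status"]
        (PySem.Set.ofList (row.map Prod.fst))) ?_)
    · exact congrArg (fun l => (ddAux PySem.Set.empty l).1)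
        (by simp [Gm, bPreds, List.flatMap_cons, List.flatMap_nil, List.append_assoc])
    · exact congrArg (fun l => (ddAux PySem.Set.empty l).1) (by simp)
  | true =>
    simp only [if_true]
    refine Eq.trans ?_ (Eq.trans
      (key (["id", "customer_name", "mobile_number", "variant_name", "booking_date"] ++ ["delivery_date"])
        ["net_receivable", "total_received", "balance_amount", "total_actual_discount",
          "total_allowed_discount", "total_excess_discount", "status"]
        (PySem.Set.ofList (row.map Prod.fst))) ?_)
    · exact congrArg (fun l => (ddAux PySem.Set.empty l).1)
        (by simp [Gm, bPreds, List.flatMap_cons, List.flatMap_nil, List.append_assoc])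
    · exact congrArg (fun l => (ddAux PySem.Set.empty l).1) (by simp)
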